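-- pv_equiv track=rewrite | github.com/EthanHunt711/Turtle | week5.py | midchars
-- ===== SOURCE A (Python) =====
-- def midchars(strings):
--     startchars = []
--     endchars = []
--     result = []
--     for s in strings:
--         startchars.append(s[0])
--         endchars.append(s[-1])
--     for s in strings:
--         for c in s[1:-1]:
--             if c not in startchars and c not in endchars:
--                 result.append(c)
--     return ''.join(sorted(set(result)))
-- ===== SOURCE B (Python) =====
-- def midchars(strings):
--     # One pass: classify each character in a status dict (False = seen as a
--     # first/last char, True = seen only as an interior char so far).
--     status = {}
--     for s in strings:
--         status[s[0]] = False
--         status[s[-1]] = False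
--         for c in s[1:-1]:
--             if c not in status:
--                 status[c] = True
--     return ''.join(sorted(c for c, ok in status.items() if ok))
-- ===== Notes on version B (the rewrite author's own statement) =====
-- stated objective: alternative
-- what changed: Replaces A's two-phase collect-boundary-lists-then-filter-interior-chars algorithm (with per-character list-membership scans) by a single pass that classifies every character in one status dict: boundary characters are overwritten to False, fresh interior characters enter as True, and the True keys are sorted at the end.
import Mathlib
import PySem

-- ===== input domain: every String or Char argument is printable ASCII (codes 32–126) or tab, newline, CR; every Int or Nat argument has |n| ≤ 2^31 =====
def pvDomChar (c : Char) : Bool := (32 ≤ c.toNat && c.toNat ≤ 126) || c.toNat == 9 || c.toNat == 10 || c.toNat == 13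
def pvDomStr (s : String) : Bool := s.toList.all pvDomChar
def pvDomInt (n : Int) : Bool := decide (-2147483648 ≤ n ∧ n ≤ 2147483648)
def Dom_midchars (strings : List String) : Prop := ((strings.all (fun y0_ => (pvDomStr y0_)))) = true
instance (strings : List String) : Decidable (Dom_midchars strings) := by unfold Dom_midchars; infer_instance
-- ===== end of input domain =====

-- B replaces A's collect-then-filter two-phase algorithm by a single pass that
-- classifies every character in one status dict (boundary chars overwrite to
-- False, fresh interior chars enter as True); simpler: one pass, no filtering scan.

-- ===== PORT A =====
-- s[0] / s[-1] raise IndexError on an empty string; Pre_ excludes those inputs,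
-- so the '.getD ' '' totalisation default is never reached on admitted inputs.
def midchars (strings : List String) : String :=
  let startchars := strings.foldl (fun acc s => acc ++ [(PySem.Str.pyGet? s 0).getD ' ']) []
  let endchars := strings.foldl (fun acc s => acc ++ [(PySem.Str.pyGet? s (-1)).getD ' ']) []
  let result := strings.foldl (fun acc s =>
    (PySem.Str.slice s (some 1) (some (-1))).toList.foldl
      (fun acc c => if c ∉ startchars ∧ c ∉ endchars then acc ++ [c] else acc) acc) []
  String.ofList (PySem.List.sorted (PySem.Set.ofList result) (fun c => c) false)

-- ===== PORT B =====
-- status[s[0]] / status[s[-1]] raise IndexError on an empty string exactly as in A;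
-- the same '.getD ' '' totalisation default is never reached on admitted inputs.
def midchars_alt (strings : List String) : String :=
  let status := strings.foldl (fun d s =>
    let d := PySem.Dict.insert d ((PySem.Str.pyGet? s 0).getD ' ') false
    let d := PySem.Dict.insert d ((PySem.Str.pyGet? s (-1)).getD ' ') false
    (PySem.Str.slice s (some 1) (some (-1))).toList.foldl
      (fun d c => if PySem.Dict.contains d c = false then PySem.Dict.insert d c true else d) d)
    PySem.Dict.empty
  String.ofList (PySem.List.sorted
    ((status.items.filter (fun p => p.2)).map Prod.fst) (fun c => c) false)

-- ===== PRECONDITION & SPEC =====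
-- Pre_ excludes exactly the inputs containing an empty string, on which both A and B raise IndexError.
def Pre_midchars (strings : List String) : Prop := ∀ s ∈ strings, s ≠ ""
instance (strings : List String) : Decidable (Pre_midchars strings) := by unfold Pre_midchars; infer_instance
def pvWitness_midchars : List String := ["abc", "xy", "zqz"]

def Spec_midchars (strings : List String) (out : String) : Prop := out = midchars_alt strings
instance (strings : List String) (out : String) : Decidable (Spec_midchars strings out) := by unfold Spec_midchars; infer_instance

-- ===== CLAIM (what is proved, stated in full; the proofs are below) =====
def Claim_equal_midchars : Prop := ∀ (strings : List String), Dom_midchars strings → Pre_midchars strings → Spec_midchars strings (midchars strings)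

-- ===== LEMMAS AND PROOFS =====

-- proof-side names for the pieces of the two ports
def pvFirst (s : String) : Char := (PySem.Str.pyGet? s 0).getD ' '
def pvLast (s : String) : Char := (PySem.Str.pyGet? s (-1)).getD ' '
def pvMid (s : String) : List Char := (PySem.Str.slice s (some 1) (some (-1))).toList
def pvInner (d : PySem.Dict Char Bool) (m : List Char) : PySem.Dict Char Bool :=
  m.foldl (fun d c => if PySem.Dict.contains d c = false then PySem.Dict.insert d c true else d) d
def pvStep (d : PySem.Dict Char Bool) (s : String) : PySem.Dict Char Bool :=
  pvInner ((d.insert (pvFirst s) false).insert (pvLast s) false) (pvMid s)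
def pvBnd (ss : List String) : List Char := ss.flatMap (fun s => [pvFirst s, pvLast s])
def pvIntr (ss : List String) : List Char := ss.flatMap pvMid

theorem pvInner_get? (m : List Char) (d : PySem.Dict Char Bool) (c : Char) :
    (pvInner d m).get? c =
      if (d.get? c).isSome then d.get? c
      else if c ∈ m then some true else none := by
  induction m generalizing d with
  | nil =>
    simp only [pvInner, List.foldl_nil, List.not_mem_nil, if_false]
    cases d.get? c <;> simp
  | cons x tl ih =>
    have hstep : pvInner d (x :: tl) =
        pvInner (if PySem.Dict.contains d x = false then PySem.Dict.insert d x true else d) tl := rfl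
    rw [hstep]
    by_cases hx : (d.get? x).isSome
    · have hc : PySem.Dict.contains d x = true := by
        rw [PySem.Dict.contains_eq_isSome_get?, hx]
      rw [hc]; simp only [Bool.true_eq_false, if_false]
      rw [ih]
      by_cases hcx : c = x
      · subst hcx; simp [hx]
      · simp [List.mem_cons, hcx]
    · have hnone : d.get? x = none := by
        cases h : d.get? x with
        | none => rfl
        | some v => rw [h] at hx; simp at hx
      have hc : PySem.Dict.contains d x = false := by
        rw [PySem.Dict.contains_eq_isSome_get?, hnone]; rfl
      rw [hc]; simp only [if_true]
      rw [ih]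
      by_cases hcx : c = x
      · subst hcx
        simp [hnone]
      · simp [PySem.Dict.get?_insert, hcx, List.mem_cons]

theorem pvFold_get? (ss : List String) (d : PySem.Dict Char Bool) (c : Char) :
    (ss.foldl pvStep d).get? c =
      if c ∈ pvBnd ss then some false
      else if (d.get? c).isSome then d.get? c
      else if c ∈ pvIntr ss then some true else none := by
  induction ss generalizing d with
  | nil =>
    simp only [List.foldl_nil, pvBnd, pvIntr, List.flatMap_nil, List.not_mem_nil, if_false]
    cases d.get? c <;> simp
  | cons s tl ih =>
    rw [List.foldl_cons, ih]
    have hd2 : ((d.insert (pvFirst s) false).insert (pvLast s) false).get? c =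
        if c = pvLast s then some false else if c = pvFirst s then some false else d.get? c := by
      simp [PySem.Dict.get?_insert]
    have hstep : (pvStep d s).get? c =
        if c = pvFirst s ∨ c = pvLast s then some false
        else if (d.get? c).isSome then d.get? c
        else if c ∈ pvMid s then some true else none := by
      rw [pvStep, pvInner_get?, hd2]
      by_cases h1 : c = pvLast s
      · simp [h1]
      · by_cases h2 : c = pvFirst s <;> simp [h1, h2]
    rw [hstep]
    simp only [pvBnd, pvIntr, List.flatMap_cons, List.mem_cons, List.mem_append,
      List.not_mem_nil, or_false]
    by_cases h1 : c = pvFirst s <;> by_cases h2 : c = pvLast s <;>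
      by_cases h3 : c ∈ tl.flatMap (fun s => [pvFirst s, pvLast s]) <;>
      by_cases h4 : (d.get? c).isSome <;>
      by_cases h5 : c ∈ pvMid s <;>
      by_cases h6 : c ∈ tl.flatMap pvMid <;>
      simp_all

theorem pvInner_nodup (m : List Char) (d : PySem.Dict Char Bool)
    (h : d.keys.Nodup) : (pvInner d m).keys.Nodup := by
  induction m generalizing d with
  | nil => exact h
  | cons x tl ih =>
    have hstep : pvInner d (x :: tl) =
        pvInner (if PySem.Dict.contains d x = false then PySem.Dict.insert d x true else d) tl := rfl
    rw [hstep]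
    split
    · exact ih _ (PySem.Dict.nodup_keys_insert _ _ _ h)
    · exact ih _ h

theorem pvFold_nodup (ss : List String) (d : PySem.Dict Char Bool)
    (h : d.keys.Nodup) : (ss.foldl pvStep d).keys.Nodup := by
  induction ss generalizing d with
  | nil => exact h
  | cons s tl ih =>
    exact ih _ (pvInner_nodup _ _
      (PySem.Dict.nodup_keys_insert _ _ _ (PySem.Dict.nodup_keys_insert _ _ _ h)))

-- membership in B's pre-sort list
theorem pvB_mem (ss : List String) (c : Char) :
    c ∈ (((ss.foldl pvStep PySem.Dict.empty).items.filter (fun p => p.2)).map Prod.fst) ↔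
      c ∉ pvBnd ss ∧ c ∈ pvIntr ss := by
  have hnd : (ss.foldl pvStep PySem.Dict.empty).keys.Nodup :=
    pvFold_nodup ss _ PySem.Dict.nodup_keys_empty
  have hget := pvFold_get? ss PySem.Dict.empty c
  rw [PySem.Dict.get?_empty] at hget
  simp only [Option.isSome_none, Bool.false_eq_true, if_false] at hget
  constructor
  · intro hmem
    rcases List.mem_map.mp hmem with ⟨p, hp, hfst⟩
    rcases List.mem_filter.mp hp with ⟨hpi, hpt⟩
    have hp2 : p.2 = true := by simpa using hpt
    have : (ss.foldl pvStep PySem.Dict.empty).get? c = some true := by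
      have : (c, true) ∈ (ss.foldl pvStep PySem.Dict.empty).items := by
        have : p = (c, true) := by
          cases p; simp_all
        rwa [this] at hpi
      exact PySem.Dict.get?_of_mem_items _ this hnd
    rw [hget] at this
    by_cases hb : c ∈ pvBnd ss
    · rw [if_pos hb] at this; simp at this
    · by_cases hi : c ∈ pvIntr ss
      · exact ⟨hb, hi⟩
      · rw [if_neg hb, if_neg hi] at this; simp at this
  · rintro ⟨hb, hi⟩
    have : (ss.foldl pvStep PySem.Dict.empty).get? c = some true := by
      rw [hget, if_neg hb, if_pos hi]
    have hitems : (c, true) ∈ (ss.foldl pvStep PySem.Dict.empty).items :=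
      PySem.Dict.mem_items_of_get?_eq_some _ this
    exact List.mem_map.mpr ⟨(c, true), List.mem_filter.mpr ⟨hitems, by simp⟩, rfl⟩

theorem pvB_nodup (ss : List String) :
    (((ss.foldl pvStep PySem.Dict.empty).items.filter (fun p => p.2)).map Prod.fst).Nodup := by
  have hnd : (ss.foldl pvStep PySem.Dict.empty).keys.Nodup :=
    pvFold_nodup ss _ PySem.Dict.nodup_keys_empty
  have hsub : (((ss.foldl pvStep PySem.Dict.empty).items.filter (fun p => p.2)).map Prod.fst).Sublist
      ((ss.foldl pvStep PySem.Dict.empty).items.map Prod.fst) :=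
    (List.filter_sublist).map _
  exact hnd.sublist hsub

-- A's pre-sort list characterised as a flatMap of filters
theorem pvA_result_eq (strings : List String) :
    strings.foldl (fun acc s =>
      (PySem.Str.slice s (some 1) (some (-1))).toList.foldl
        (fun acc c => if c ∉ strings.map pvFirst ∧ c ∉ strings.map pvLast
                      then acc ++ [c] else acc) acc) []
    = strings.flatMap (fun s => (PySem.Str.slice s (some 1) (some (-1))).toList.filter
        (fun c => decide (c ∉ strings.map pvFirst ∧ c ∉ strings.map pvLast))) := by
  trans strings.foldl (fun acc s =>
      acc ++ (PySem.Str.slice s (some 1) (some (-1))).toList.filter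
        (fun c => decide (c ∉ strings.map pvFirst ∧ c ∉ strings.map pvLast))) []
  · apply PySem.List.foldl_congr_mem
    intro acc s _
    exact PySem.List.foldl_append_ite_eq_filter _ _ _
  · simpa using PySem.List.foldl_append_eq_flatMap
      (l := strings) (acc := ([] : List Char))
      (g := fun s => (PySem.Str.slice s (some 1) (some (-1))).toList.filter
        (fun c => decide (c ∉ strings.map pvFirst ∧ c ∉ strings.map pvLast)))

-- the two pre-sort lists are permutations of each other
theorem pv_perm (strings : List String) :
    (PySem.Set.ofList (strings.foldl (fun acc s =>
      (PySem.Str.slice s (some 1) (some (-1))).toList.foldl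
        (fun acc c => if c ∉ strings.map pvFirst ∧ c ∉ strings.map pvLast
                      then acc ++ [c] else acc) acc) [])).Perm
    (((strings.foldl pvStep PySem.Dict.empty).items.filter (fun p => p.2)).map Prod.fst) := by
  rw [List.perm_ext_iff_of_nodup (PySem.Set.nodup_ofList _) (pvB_nodup strings)]
  intro c
  rw [pvB_mem, PySem.Set.mem_ofList, pvA_result_eq]
  simp only [List.mem_flatMap, List.mem_filter, decide_eq_true_eq, pvBnd, pvIntr,
    List.mem_map, List.mem_cons, List.not_mem_nil, or_false, pvMid]
  constructor
  · rintro ⟨s, hs, hc, h1, h2⟩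
    refine ⟨?_, s, hs, hc⟩
    rintro ⟨t, ht, hct⟩
    rcases hct with hct | hct
    · exact h1 ⟨t, ht, hct.symm⟩
    · exact h2 ⟨t, ht, hct.symm⟩
  · rintro ⟨hb, s, hs, hc⟩
    refine ⟨s, hs, hc, ?_, ?_⟩
    · rintro ⟨t, ht, hct⟩
      exact hb ⟨t, ht, Or.inl hct.symm⟩
    · rintro ⟨t, ht, hct⟩
      exact hb ⟨t, ht, Or.inr hct.symm⟩

-- ===== VERDICT (by name: the statement is the Claim_ definition above) =====
theorem midchars_spec : Claim_equal_midchars := by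
  intro strings _ _
  unfold Spec_midchars midchars midchars_alt
  simp only [PySem.List.foldl_append_singleton_eq_map, List.nil_append]
  exact congrArg String.ofList
    ((PySem.List.sorted_id_eq_sorted_id_iff_perm _ _).mpr (pv_perm strings))
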